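-- pv_equiv track=rewrite | github.com/ataraxie68/mitmproxy3 | ga4-logger.py | _extract_max_age
-- ===== SOURCE A (Python) =====
-- def _extract_max_age(cookie_header: str) -> str:
--     """Extract Max-Age attribute from cookie header"""
--     if not cookie_header:
--         return ""
--
--     cookie_parts = cookie_header.split(';')
--     for part in cookie_parts:
--         part = part.strip()
--         if part.lower().startswith('max-age='):
--             return part.split('=', 1)[1]
--
--     return ""
-- ===== SOURCE B (Python) =====
-- def _extract_max_age(cookie_header: str) -> str:
--     """Extract Max-Age attribute from cookie header"""
--     attrs = {}
--     for part in cookie_header.split(';'):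
--         part = part.strip()
--         if '=' in part:
--             key, value = part.split('=', 1)
--             k = key.lower()
--             if k not in attrs:
--                 attrs[k] = value
--     return attrs.get('max-age', '')
-- ===== Notes on version B (the rewrite author's own statement) =====
-- stated objective: idiomatic
-- what changed: B replaces A's early-return linear scan for the 'max-age=' prefix by a general cookie-attribute parse: it builds a first-match dict of lowercased-key attributes in one pass and then looks up 'max-age'.
import Mathlib
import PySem

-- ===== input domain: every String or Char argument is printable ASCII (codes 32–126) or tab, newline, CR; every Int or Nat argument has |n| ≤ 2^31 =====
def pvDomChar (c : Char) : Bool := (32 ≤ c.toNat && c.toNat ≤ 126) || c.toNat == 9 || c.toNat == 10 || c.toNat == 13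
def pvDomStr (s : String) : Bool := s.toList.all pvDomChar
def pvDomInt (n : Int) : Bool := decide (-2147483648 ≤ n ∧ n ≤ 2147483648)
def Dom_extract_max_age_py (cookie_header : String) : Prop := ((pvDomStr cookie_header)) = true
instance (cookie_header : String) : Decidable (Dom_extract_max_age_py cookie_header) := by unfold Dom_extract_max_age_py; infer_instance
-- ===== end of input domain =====

-- B re-implements A by parsing the header into a first-match attribute dict and looking up
-- 'max-age' (objective: idiomatic/alternative decomposition, same cost).

-- ===== PORT A =====
-- the for-loop over cookie_parts: strip each part, return the value of the first part whose
-- lowercased form starts with 'max-age='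
def extractGoA : List String → String
  | [] => ""
  | part :: rest =>
    let p := PySem.Str.strip part
    if PySem.Str.startswith (PySem.Str.lower p) "max-age=" then
      -- part.split('=', 1)[1]: the branch condition guarantees '=' ∈ p, so index 1 exists,
      -- and sep "=" is nonempty, so splitMax? is `some`: both defaults are unreachable
      match PySem.Str.splitMax? p "=" 1 with
      | some l => (PySem.List.pyGet? l 1).getD ""
      | none => ""
    else extractGoA rest

def extract_max_age_py (cookie_header : String) : String :=
  if cookie_header == "" then ""
  else
    match PySem.Str.split? cookie_header ";" with
    | some cookie_parts => extractGoA cookie_parts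
    | none => ""   -- unreachable: sep ";" is nonempty

-- ===== PORT B =====
-- one step of B's loop: strip the part and, if it contains '=', split once into key/value and
-- record the value under the lowercased key only if that key is not yet present
def attrStep (d : PySem.Dict String String) (part : String) : PySem.Dict String String :=
  let p := PySem.Str.strip part
  if PySem.Str.isIn "=" p then
    -- '=' ∈ p guarantees split('=', 1) yields exactly two pieces; the `_` arm is unreachable
    match PySem.Str.splitMax? p "=" 1 with
    | some (key :: value :: _) =>
      let k := PySem.Str.lower key
      if d.contains k then d else d.insert k value
    | _ => d
  else d

def extract_max_age_py_alt (cookie_header : String) : String :=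
  match PySem.Str.split? cookie_header ";" with
  | some parts => (parts.foldl attrStep PySem.Dict.empty).getD "max-age" ""
  | none => ""   -- unreachable: sep ";" is nonempty

-- ===== PRECONDITION & SPEC =====
def Spec_extract_max_age_py (cookie_header : String) (out : String) : Prop := out = extract_max_age_py_alt cookie_header
instance (cookie_header : String) (out : String) : Decidable (Spec_extract_max_age_py cookie_header out) := by unfold Spec_extract_max_age_py; infer_instance

-- ===== CLAIM (what is proved, stated in full; the proofs are below) =====
def Claim_equal_extract_max_age_py : Prop := ∀ (cookie_header : String), Dom_extract_max_age_py cookie_header → Spec_extract_max_age_py cookie_header (extract_max_age_py cookie_header)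

-- ===== LEMMAS AND PROOFS =====

-- `.lower()` turns a character into '=' exactly when it already is '='
lemma lowerChar_eq_eq (c : Char) : (PySem.Chars.lowerChar c = '=') ↔ c = '=' := by
  rw [PySem.Chars.lowerChar]
  split_ifs with h
  · simp only [PySem.Chars.isupper, Bool.and_eq_true, decide_eq_true_eq] at h
    obtain ⟨h1, h2⟩ := h
    rw [Char.le_def] at h1 h2
    replace h1 := UInt32.le_iff_toNat_le.mp h1
    replace h2 := UInt32.le_iff_toNat_le.mp h2
    change (65:Nat) ≤ c.toNat at h1
    change c.toNat ≤ (90:Nat) at h2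
    constructor
    · intro he
      have h3 := congrArg Char.toNat he
      rw [Char.toNat_ofNat, if_pos (by left; omega : (c.toNat + 32).isValidChar)] at h3
      change _ = (61:Nat) at h3
      omega
    · intro he; subst he
      change (65:Nat) ≤ (61:Nat) at h1
      omega
  · exact Iff.rfl

-- s.lower().startswith(pat + '='), for a pattern without '=', says: s contains '=' and the
-- part of s before its first '=' lowercases to pat
lemma startswith_lower_eq (s pat : List Char) (hp : '=' ∉ pat) :
    PySem.Chars.startswith (PySem.Chars.lower s) (pat ++ ['=']) = true ↔
      '=' ∈ s ∧ PySem.Chars.lower (s.takeWhile (· ≠ '=')) = pat := by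
  induction s generalizing pat with
  | nil =>
    cases pat <;> simp [PySem.Chars.startswith, PySem.Chars.lower]
  | cons c rest ih =>
    have hlq : PySem.Chars.lowerChar '=' = '=' := by decide
    by_cases hc : c = '='
    · subst hc
      cases pat with
      | nil =>
        simp [PySem.Chars.startswith, PySem.Chars.lower, hlq]
      | cons q pat' =>
        have hq : q ≠ '=' := fun h => hp (h ▸ List.mem_cons_self ..)
        simp [PySem.Chars.startswith, PySem.Chars.lower, hlq, List.cons_prefix_cons, hq]
    · cases pat with
      | nil =>
        have hlc : PySem.Chars.lowerChar c ≠ '=' := fun h => hc ((lowerChar_eq_eq c).mp h)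
        simp [PySem.Chars.startswith, PySem.Chars.lower, hc, List.cons_prefix_cons, Ne.symm hlc]
      | cons q pat' =>
        have hq : q ≠ '=' := fun h => hp (h ▸ List.mem_cons_self ..)
        have hp' : '=' ∉ pat' := fun h => hp (List.mem_cons_of_mem _ h)
        have h2 := ih pat' hp'
        simp only [PySem.Chars.startswith, PySem.Chars.lower,
          List.isPrefixOf_iff_prefix] at h2 ⊢
        simp only [List.cons_append, List.map_cons, List.cons_prefix_cons]
        rw [h2]
        simp [hc, Ne.symm hc, eq_comm]
        tauto

-- splitOnMax.go with maxsplit budget 0 just flushes the rest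
lemma go_zero (fuel : Nat) (l cur : List Char) (acc : List (List Char)) :
    PySem.Chars.splitOnMax.go ['='] fuel 0 l cur acc = ((cur.reverse ++ l) :: acc).reverse := by
  cases fuel <;> cases l <;> simp [PySem.Chars.splitOnMax.go]

-- splitOnMax.go with budget 1: split at the first '=' if any
lemma go_one (l : List Char) (fuel : Nat) (hf : l.length ≤ fuel) (cur : List Char)
    (acc : List (List Char)) :
    PySem.Chars.splitOnMax.go ['='] (fuel + 1) 1 l cur acc =
      (if '=' ∈ l then
          ((l.dropWhile (· ≠ '=')).tail :: (cur.reverse ++ l.takeWhile (· ≠ '=')) :: acc)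
        else ((cur.reverse ++ l) :: acc)).reverse := by
  induction l generalizing fuel cur acc with
  | nil => simp [PySem.Chars.splitOnMax.go]
  | cons c rest ih =>
    by_cases hc : c = '='
    · subst hc
      simp only [PySem.Chars.splitOnMax.go]
      rw [if_neg (by omega), if_pos (by simp [List.isPrefixOf])]
      simp [go_zero]
    · cases fuel with
      | zero => simp at hf
      | succ f =>
        have hf' : rest.length ≤ f := by simpa using hf
        simp only [PySem.Chars.splitOnMax.go]
        rw [if_neg (by omega), if_neg (by simp [List.isPrefixOf, Ne.symm hc])]
        rw [ih f hf' (c :: cur) acc]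
        simp [hc, Ne.symm hc, List.append_assoc]

-- part.split('=', 1) characterised: split at the first '=' if any
lemma splitOnMax_one (cs : List Char) :
    PySem.Chars.splitOnMax cs ['='] 1 =
      if '=' ∈ cs then [cs.takeWhile (· ≠ '='), (cs.dropWhile (· ≠ '=')).tail] else [cs] := by
  rw [PySem.Chars.splitOnMax]
  rw [if_neg (by omega)]
  have := go_one cs cs.length (le_refl _) [] []
  simp only [Int.toNat_one] at *
  rw [this]
  split_ifs <;> simp

-- once 'max-age' is in the dict, every later step preserves its value
lemma step_preserve (d : PySem.Dict String String) (p : String)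
    (h : d.contains "max-age" = true) :
    (attrStep d p).contains "max-age" = true ∧
      (attrStep d p).getD "max-age" "" = d.getD "max-age" "" := by
  rw [attrStep]
  split_ifs with h1
  · rcases hm : PySem.Str.splitMax? (PySem.Str.strip p) "=" 1 with _ | l
    · simp [h]
    · rcases l with _ | ⟨k, _ | ⟨v, t⟩⟩ <;> simp only [h, and_self]
      split_ifs with h2
      · simp [h]
      · have hne : "max-age" ≠ PySem.Str.lower k := fun he => by
          rw [← he] at h2; exact h2 h
        simp [PySem.Dict.contains_insert, PySem.Dict.getD_insert_of_ne _ _ _ hne, h]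
  · simp [h]

lemma fold_hold (parts : List String) (d : PySem.Dict String String)
    (h : d.contains "max-age" = true) :
    (parts.foldl attrStep d).getD "max-age" "" = d.getD "max-age" "" := by
  induction parts generalizing d with
  | nil => rfl
  | cons p rest ih =>
    obtain ⟨h1, h2⟩ := step_preserve d p h
    simp only [List.foldl_cons]
    rw [ih (attrStep d p) h1, h2]

-- main invariant: folding B's step from a dict not yet holding 'max-age' yields A's scan
lemma fold_spec (parts : List String) (d : PySem.Dict String String)
    (h : d.contains "max-age" = false) :
    (parts.foldl attrStep d).getD "max-age" "" = extractGoA parts := by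
  induction parts generalizing d with
  | nil => exact PySem.Dict.getD_of_not_contains d "" h
  | cons p rest ih =>
    have hpat : ("max-age=" : String).toList = ("max-age" : String).toList ++ ['='] := by decide
    have hnp : '=' ∉ ("max-age" : String).toList := by decide
    have heqL : ("=" : String).toList = ['='] := by decide
    set cs := (PySem.Str.strip p).toList with hcs
    have hcond : (PySem.Str.startswith (PySem.Str.lower (PySem.Str.strip p)) "max-age=" = true)
        ↔ ('=' ∈ cs ∧ PySem.Chars.lower (cs.takeWhile (· ≠ '=')) = ("max-age" : String).toList) := by
      rw [PySem.Str.startswith_eq, PySem.Str.toList_lower, hpat]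
      exact startswith_lower_eq cs _ hnp
    by_cases hm : '=' ∈ cs
    · -- the part carries '=': it splits into exactly key and value
      have hsplit : PySem.Str.splitMax? (PySem.Str.strip p) "=" 1 =
          some [String.ofList (cs.takeWhile (· ≠ '=')),
                String.ofList ((cs.dropWhile (· ≠ '=')).tail)] := by
        rw [PySem.Str.splitMax?, heqL, PySem.Chars.splitMax?, if_neg (by decide)]
        rw [splitOnMax_one, if_pos hm]
        rfl
      have hisin : PySem.Str.isIn "=" (PySem.Str.strip p) = true := by
        apply (PySem.Str.isIn_iff_infix _ _).mpr
        rw [heqL, List.singleton_infix_iff]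
        exact hm
      have hkey : (PySem.Str.lower (String.ofList (cs.takeWhile (· ≠ '='))) = "max-age")
          ↔ PySem.Chars.lower (cs.takeWhile (· ≠ '=')) = ("max-age" : String).toList := by
        constructor
        · intro he
          have h3 := congrArg String.toList he
          rw [PySem.Str.toList_lower, String.toList_ofList] at h3
          exact h3
        · intro he
          apply String.toList_inj.mp
          rw [PySem.Str.toList_lower, String.toList_ofList]
          exact he
      by_cases hT : PySem.Chars.lower (cs.takeWhile (· ≠ '=')) = ("max-age" : String).toList
      · -- this part IS the first max-age attribute
        have hA : PySem.Str.startswith (PySem.Str.lower (PySem.Str.strip p)) "max-age=" = true :=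
          hcond.mpr ⟨hm, hT⟩
        have hstep : attrStep d p =
            d.insert "max-age" (String.ofList ((cs.dropWhile (· ≠ '=')).tail)) := by
          rw [attrStep]
          rw [if_pos hisin, hsplit]
          simp only []
          rw [hkey.mpr hT, if_neg (by rw [h]; exact Bool.false_ne_true)]
        simp only [List.foldl_cons, hstep]
        rw [fold_hold _ _ (by rw [PySem.Dict.contains_insert, h]; rfl)]
        rw [PySem.Dict.getD_insert, if_pos rfl]
        simp only [extractGoA]
        rw [if_pos hA, hsplit]
        rfl
      · -- a different attribute: A skips it, B files it under another key (or not at all)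
        have hA : ¬ PySem.Str.startswith (PySem.Str.lower (PySem.Str.strip p)) "max-age=" = true :=
          fun hA => hT (hcond.mp hA).2
        have hk : PySem.Str.lower (String.ofList (cs.takeWhile (· ≠ '='))) ≠ "max-age" :=
          fun he => hT (hkey.mp he)
        have hstep : (attrStep d p).contains "max-age" = false := by
          rw [attrStep]
          rw [if_pos hisin, hsplit]
          simp only []
          split_ifs with h2
          · exact h
          · rw [PySem.Dict.contains_insert, h, Bool.or_false]
            exact beq_eq_false_iff_ne.mpr (Ne.symm hk)
        simp only [List.foldl_cons, extractGoA]
        rw [if_neg hA]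
        exact ih _ hstep
    · -- no '=' in the part: both sides skip it
      have hA : ¬ PySem.Str.startswith (PySem.Str.lower (PySem.Str.strip p)) "max-age=" = true :=
        fun hA => hm (hcond.mp hA).1
      have hisin : PySem.Str.isIn "=" (PySem.Str.strip p) = false := by
        cases hx : PySem.Str.isIn "=" (PySem.Str.strip p) with
        | false => rfl
        | true =>
          exfalso
          have h4 := (PySem.Str.isIn_iff_infix _ _).mp hx
          rw [heqL, List.singleton_infix_iff] at h4
          exact hm h4
      have hstep : attrStep d p = d := by
        rw [attrStep]
        simp only [hisin, Bool.false_eq_true, if_false]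
      simp only [List.foldl_cons, extractGoA, hstep]
      rw [if_neg hA]
      exact ih d h

-- ===== VERDICT (by name: the statement is the Claim_ definition above) =====
theorem extract_max_age_py_spec : Claim_equal_extract_max_age_py := by
  intro ch _
  unfold Spec_extract_max_age_py extract_max_age_py extract_max_age_py_alt
  by_cases h : ch = ""
  · subst h; decide
  · rw [if_neg (by simpa using h)]
    rcases hs : PySem.Str.split? ch ";" with _ | parts
    · simp [PySem.Str.split?, PySem.Chars.split?] at hs
    · exact (fold_spec parts _ (PySem.Dict.contains_empty _)).symm
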